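-- pv_equiv track=rewrite | github.com/Ozdemir-B/multithread--elevator | main1.py | list_to_tuple
-- ===== SOURCE A (Python) =====
-- def list_to_tuple(liste):
--     temp1=0
--     temp2=0
--     tuple_list=[]
--     for i in range(0,5):
--         for j in liste:
--             if j == i:
--                 temp1+=1
--         tuple_list.append((temp1,i))
--         temp1=0
--     tuple_list2=[]
--     for i in tuple_list:
--         if i[0] != 0:
--             tuple_list2.append(i)
--
--     return tuple_list2
-- ===== SOURCE B (Python) =====
-- def list_to_tuple(liste):
--     counts = [0] * 5
--     for j in liste:
--         if 0 <= j < 5: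
--             counts[j] += 1
--     return [(counts[i], i) for i in range(5) if counts[i] != 0]
-- ===== Notes on version B (the rewrite author's own statement) =====
-- stated objective: simpler
-- what changed: Replaces the five full rescans of liste (one per value 0-4) by a single counting pass into a fixed 5-slot table, then a fixed five-element emit pass.
import Mathlib
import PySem

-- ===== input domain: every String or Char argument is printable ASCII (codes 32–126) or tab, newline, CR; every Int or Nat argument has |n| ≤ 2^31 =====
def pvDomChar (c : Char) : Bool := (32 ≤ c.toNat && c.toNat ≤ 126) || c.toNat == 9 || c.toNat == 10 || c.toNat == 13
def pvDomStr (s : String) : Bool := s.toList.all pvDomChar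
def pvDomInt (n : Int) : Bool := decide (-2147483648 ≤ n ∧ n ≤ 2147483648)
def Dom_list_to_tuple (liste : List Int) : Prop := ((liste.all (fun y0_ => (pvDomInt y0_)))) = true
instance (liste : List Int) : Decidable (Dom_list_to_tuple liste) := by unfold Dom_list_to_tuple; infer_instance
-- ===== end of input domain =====

-- B replaces A's five full rescans of liste (one per value 0..4) by a single counting
-- pass into a fixed 5-slot table plus a fixed emit pass (objective: simpler).

-- ===== PORT A =====
def list_to_tuple (liste : List Int) : List (Int × Int) :=
  -- for i in range(0,5): for j in liste: if j == i: temp1 += 1; append (temp1, i); temp1 = 0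
  let tuple_list := (PySem.List.pyRange 0 5 1).foldl (fun acc i =>
    let temp1 := liste.foldl (fun t j => if j == i then t + 1 else t) 0
    acc ++ [(temp1, i)]) []
  -- second loop: keep pairs whose first component is ≠ 0
  tuple_list.foldl (fun acc2 p => if p.1 ≠ 0 then acc2 ++ [p] else acc2) []

-- ===== PORT B =====
def list_to_tuple_alt (liste : List Int) : List (Int × Int) :=
  -- single pass: if 0 <= j < 5: counts[j] += 1
  let counts := liste.foldl (fun c j =>
    if 0 ≤ j ∧ j < 5 then c.set j.toNat (c.getD j.toNat 0 + 1) else c)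
    ([0, 0, 0, 0, 0] : List Int)
  -- emit pass: [(counts[i], i) for i in range(5) if counts[i] != 0]
  (List.range 5).filterMap (fun i =>
    if counts.getD i 0 ≠ 0 then some (counts.getD i 0, (i : Int)) else none)

-- ===== PRECONDITION & SPEC =====
def Spec_list_to_tuple (liste : List Int) (out : List (Int × Int)) : Prop := out = list_to_tuple_alt liste
instance (liste : List Int) (out : List (Int × Int)) : Decidable (Spec_list_to_tuple liste out) := by unfold Spec_list_to_tuple; infer_instance

-- ===== CLAIM (what is proved, stated in full; the proofs are below) =====
def Claim_equal_list_to_tuple : Prop := ∀ (liste : List Int), Dom_list_to_tuple liste → Spec_list_to_tuple liste (list_to_tuple liste)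

-- ===== LEMMAS AND PROOFS =====

-- the number of occurrences of i in a list, as both programs count it
def pvCnt (i : Int) : List Int → Int
  | [] => 0
  | x :: xs => (if x == i then 1 else 0) + pvCnt i xs

-- A's inner counting loop with an arbitrary accumulator computes pvCnt
theorem pvCnt_acc (i t : Int) (xs : List Int) :
    xs.foldl (fun t j => if j == i then t + 1 else t) t = t + pvCnt i xs := by
  induction xs generalizing t with
  | nil => simp [pvCnt]
  | cons x xs ih =>
      simp only [List.foldl_cons]
      rw [ih]
      simp only [pvCnt]
      split <;> ring

-- B's single counting pass, fully characterised on the 5-slot table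
theorem countsFold (liste : List Int) (a b c d e : Int) :
    liste.foldl (fun c j =>
        if 0 ≤ j ∧ j < 5 then c.set j.toNat (c.getD j.toNat 0 + 1) else c) [a, b, c, d, e]
      = [a + pvCnt 0 liste, b + pvCnt 1 liste, c + pvCnt 2 liste, d + pvCnt 3 liste,
         e + pvCnt 4 liste] := by
  induction liste generalizing a b c d e with
  | nil => simp [pvCnt]
  | cons x xs ih =>
      simp only [List.foldl_cons]
      by_cases h : 0 ≤ x ∧ x < 5
      · have hx : x = 0 ∨ x = 1 ∨ x = 2 ∨ x = 3 ∨ x = 4 := by omega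
        rcases hx with rfl | rfl | rfl | rfl | rfl
        · rw [if_pos h,
            show ([a,b,c,d,e] : List Int).set (Int.toNat 0) (([a,b,c,d,e] : List Int).getD (Int.toNat 0) 0 + 1) = [a+1,b,c,d,e] from rfl, ih]
          simp [pvCnt]; ring_nf
        · rw [if_pos h,
            show ([a,b,c,d,e] : List Int).set (Int.toNat 1) (([a,b,c,d,e] : List Int).getD (Int.toNat 1) 0 + 1) = [a,b+1,c,d,e] from rfl, ih]
          simp [pvCnt]; ring_nf
        · rw [if_pos h,
            show ([a,b,c,d,e] : List Int).set (Int.toNat 2) (([a,b,c,d,e] : List Int).getD (Int.toNat 2) 0 + 1) = [a,b,c+1,d,e] from rfl, ih]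
          simp [pvCnt]; ring_nf
        · rw [if_pos h,
            show ([a,b,c,d,e] : List Int).set (Int.toNat 3) (([a,b,c,d,e] : List Int).getD (Int.toNat 3) 0 + 1) = [a,b,c,d+1,e] from rfl, ih]
          simp [pvCnt]; ring_nf
        · rw [if_pos h,
            show ([a,b,c,d,e] : List Int).set (Int.toNat 4) (([a,b,c,d,e] : List Int).getD (Int.toNat 4) 0 + 1) = [a,b,c,d,e+1] from rfl, ih]
          simp [pvCnt]; ring_nf
      · rw [if_neg h, ih]
        simp [pvCnt]
        omega

-- ===== VERDICT (by name: the statement is the Claim_ definition above) =====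
theorem list_to_tuple_spec : Claim_equal_list_to_tuple := by
  intro liste _
  show list_to_tuple liste = list_to_tuple_alt liste
  have hr : PySem.List.pyRange 0 5 1 = [0, 1, 2, 3, 4] := by decide
  unfold list_to_tuple list_to_tuple_alt
  rw [hr, countsFold]
  simp only [List.foldl_cons, List.foldl_nil, pvCnt_acc, zero_add, List.nil_append,
    List.range, List.range.loop, List.filterMap, List.getD, List.getElem?_cons_zero,
    List.getElem?_cons_succ, Option.getD_some]
  norm_num
  split_ifs <;> simp_all
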